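-- pv_equiv track=rewrite | github.com/webmetic-gmbh/webmetic-utm-referrer-attribution-parser | utm_referrer_parser/parameters.py | get_parameter_categories
-- ===== SOURCE A (Python) =====
-- from typing import Dict, List, Optional, Set
--
-- UTM_PARAMETERS = {
--     'utm_source',
--     'utm_medium',
--     'utm_campaign',
--     'utm_term',
--     'utm_content',
--     'utm_id'
-- }
--
-- GOOGLE_ADS_PARAMETERS = {
--     'gclid',      # Google Click ID
--     'gclsrc',     # Google Click Source
--     'gbraid',     # Google Ads - Enhanced Conversions
--     'wbraid',     # Google Ads - Web to App
--     'gad_source', # Google Ads Source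
--     'gad_campaignid', # Google Ads Campaign ID
--     'srsltid'     # Google Shopping
-- }
--
-- SOCIAL_MEDIA_PARAMETERS = {
--     'fbclid',     # Facebook Click ID
--     'ttclid',     # TikTok Click ID
--     'twclid',     # Twitter Click ID
--     'li_fat_id',  # LinkedIn First-Party Ad Tracking
--     'igshid',     # Instagram Share ID
--     'ScCid'       # Snapchat Click ID
-- }
--
-- MICROSOFT_PARAMETERS = {
--     'msclkid',    # Microsoft Click ID (Bing Ads)
-- }
--
-- EMAIL_MARKETING_PARAMETERS = {
--     'mc_cid',               # Mailchimp Campaign ID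
--     'mc_eid',               # Mailchimp Email ID
--     'ml_subscriber_hash'    # MailerLite Subscriber Hash
-- }
--
-- ANALYTICS_PARAMETERS = {
--     'pk_campaign', # Piwik/Matomo Campaign
--     'pk_source',   # Piwik/Matomo Source
--     'pk_medium'    # Piwik/Matomo Medium
-- }
--
-- def get_parameter_categories(parameters: Dict[str, str]) -> Dict[str, List[str]]:
--     """
--     Categorize extracted parameters by their source/type.
--
--     Args:
--         parameters: Dictionary of extracted parameters
--
--     Returns:
--         Dict with parameter categories as keys and lists of param names as values
--     """
--     categories = {
--         'utm': [],
--         'google_ads': [],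
--         'social_media': [],
--         'microsoft': [],
--         'email_marketing': [],
--         'analytics': [],
--         'other': []
--     }
--
--     for param in parameters.keys():
--         param_lower = param.lower()
--
--         if param_lower in {p.lower() for p in UTM_PARAMETERS}:
--             categories['utm'].append(param)
--         elif param_lower in {p.lower() for p in GOOGLE_ADS_PARAMETERS}:
--             categories['google_ads'].append(param)
--         elif param_lower in {p.lower() for p in SOCIAL_MEDIA_PARAMETERS}:
--             categories['social_media'].append(param)
--         elif param_lower in {p.lower() for p in MICROSOFT_PARAMETERS}:
--             categories['microsoft'].append(param)
--         elif param_lower in {p.lower() for p in EMAIL_MARKETING_PARAMETERS}: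
--             categories['email_marketing'].append(param)
--         elif param_lower in {p.lower() for p in ANALYTICS_PARAMETERS}:
--             categories['analytics'].append(param)
--         else:
--             categories['other'].append(param)
--
--     # Remove empty categories
--     return {k: v for k, v in categories.items() if v}
-- ===== SOURCE B (Python) =====
-- from typing import Dict, List
--
-- # Category groups with already-lowercased parameter names, in the fixed output order.
-- _GROUPS = [
--     ('utm', frozenset({'utm_source', 'utm_medium', 'utm_campaign',
--                        'utm_term', 'utm_content', 'utm_id'})),
--     ('google_ads', frozenset({'gclid', 'gclsrc', 'gbraid', 'wbraid',
--                               'gad_source', 'gad_campaignid', 'srsltid'})),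
--     ('social_media', frozenset({'fbclid', 'ttclid', 'twclid',
--                                 'li_fat_id', 'igshid', 'sccid'})),
--     ('microsoft', frozenset({'msclkid'})),
--     ('email_marketing', frozenset({'mc_cid', 'mc_eid', 'ml_subscriber_hash'})),
--     ('analytics', frozenset({'pk_campaign', 'pk_source', 'pk_medium'})),
-- ]
--
-- _ALL_KNOWN = frozenset(name for _, names in _GROUPS for name in names)
--
--
-- def get_parameter_categories(parameters: Dict[str, str]) -> Dict[str, List[str]]:
--     # Staged passes: one filter pass per category (the groups are pairwise
--     # disjoint, so per-category filtering agrees with first-match classification),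
--     # then one pass for the uncategorized rest; empty categories are never added.
--     result = {}
--     for cat, names in _GROUPS:
--         matched = [p for p in parameters if p.lower() in names]
--         if matched:
--             result[cat] = matched
--     other = [p for p in parameters if p.lower() not in _ALL_KNOWN]
--     if other:
--         result['other'] = other
--     return result
-- ===== Notes on version B (the rewrite author's own statement) =====
-- stated objective: faster
-- what changed: Replaced A's single pass that classifies each key through an if/elif chain (rebuilding six lowered sets per key) into a pre-built 7-key dict filtered of empty lists at the end, by staged per-category filter passes: one list-comprehension filter over the keys per pairwise-disjoint group plus one pass for the uncategorized rest, appending each non-empty category directly in the fixed order.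
import Mathlib
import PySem

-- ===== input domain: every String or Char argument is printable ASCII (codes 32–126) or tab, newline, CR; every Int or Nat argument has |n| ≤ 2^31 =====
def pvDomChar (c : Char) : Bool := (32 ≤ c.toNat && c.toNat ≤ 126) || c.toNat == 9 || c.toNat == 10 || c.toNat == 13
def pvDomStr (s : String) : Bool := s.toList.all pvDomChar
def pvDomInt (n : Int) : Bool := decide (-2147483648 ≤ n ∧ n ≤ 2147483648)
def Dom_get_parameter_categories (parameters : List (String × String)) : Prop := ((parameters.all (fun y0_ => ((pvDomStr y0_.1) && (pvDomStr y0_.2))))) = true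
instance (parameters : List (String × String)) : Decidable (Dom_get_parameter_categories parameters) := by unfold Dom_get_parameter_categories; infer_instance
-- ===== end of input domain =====

-- B replaces A's single classify-each-key loop (if/elif chain into a pre-built 7-key dict,
-- filtered of empty lists at the end) by staged per-category filter passes over the keys,
-- appending each non-empty category directly in the fixed order (objective: alternative).
-- Neither program mutates its argument; the equivalence is about the return value.

-- ===== PORT A =====
-- module-level constants (Python sets; used for membership only)
def UTM_PARAMETERS : PySem.Set String :=
  PySem.Set.ofList ["utm_source", "utm_medium", "utm_campaign", "utm_term", "utm_content", "utm_id"]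
def GOOGLE_ADS_PARAMETERS : PySem.Set String :=
  PySem.Set.ofList ["gclid", "gclsrc", "gbraid", "wbraid", "gad_source", "gad_campaignid", "srsltid"]
def SOCIAL_MEDIA_PARAMETERS : PySem.Set String :=
  PySem.Set.ofList ["fbclid", "ttclid", "twclid", "li_fat_id", "igshid", "ScCid"]
def MICROSOFT_PARAMETERS : PySem.Set String :=
  PySem.Set.ofList ["msclkid"]
def EMAIL_MARKETING_PARAMETERS : PySem.Set String :=
  PySem.Set.ofList ["mc_cid", "mc_eid", "ml_subscriber_hash"]
def ANALYTICS_PARAMETERS : PySem.Set String :=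
  PySem.Set.ofList ["pk_campaign", "pk_source", "pk_medium"]

def get_parameter_categories (parameters : List (String × String)) : List (String × List String) :=
  let categories : PySem.Dict String (List String) :=
    PySem.Dict.ofList [("utm", []), ("google_ads", []), ("social_media", []), ("microsoft", []),
                       ("email_marketing", []), ("analytics", []), ("other", [])]
  let categories := parameters.foldl (fun cats kv =>
    let param := kv.1
    let param_lower := PySem.Str.lower param
    if PySem.Set.contains (PySem.Set.ofList (UTM_PARAMETERS.map PySem.Str.lower)) param_lower then
      cats.modify "utm" [] (· ++ [param])
    else if PySem.Set.contains (PySem.Set.ofList (GOOGLE_ADS_PARAMETERS.map PySem.Str.lower)) param_lower then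
      cats.modify "google_ads" [] (· ++ [param])
    else if PySem.Set.contains (PySem.Set.ofList (SOCIAL_MEDIA_PARAMETERS.map PySem.Str.lower)) param_lower then
      cats.modify "social_media" [] (· ++ [param])
    else if PySem.Set.contains (PySem.Set.ofList (MICROSOFT_PARAMETERS.map PySem.Str.lower)) param_lower then
      cats.modify "microsoft" [] (· ++ [param])
    else if PySem.Set.contains (PySem.Set.ofList (EMAIL_MARKETING_PARAMETERS.map PySem.Str.lower)) param_lower then
      cats.modify "email_marketing" [] (· ++ [param])
    else if PySem.Set.contains (PySem.Set.ofList (ANALYTICS_PARAMETERS.map PySem.Str.lower)) param_lower then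
      cats.modify "analytics" [] (· ++ [param])
    else
      cats.modify "other" [] (· ++ [param])) categories
  -- {k: v for k, v in categories.items() if v}
  categories.items.filter (fun kv => !kv.2.isEmpty)

-- ===== PORT B =====
-- _GROUPS: fixed category order, with already-lowercased names (frozensets of literals)
def pvUtmL : List String := ["utm_source", "utm_medium", "utm_campaign", "utm_term", "utm_content", "utm_id"]
def pvGoogleL : List String := ["gclid", "gclsrc", "gbraid", "wbraid", "gad_source", "gad_campaignid", "srsltid"]
def pvSocialL : List String := ["fbclid", "ttclid", "twclid", "li_fat_id", "igshid", "sccid"]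
def pvMicrosoftL : List String := ["msclkid"]
def pvEmailL : List String := ["mc_cid", "mc_eid", "ml_subscriber_hash"]
def pvAnalyticsL : List String := ["pk_campaign", "pk_source", "pk_medium"]

def pvGroups : List (String × List String) :=
  [("utm", pvUtmL), ("google_ads", pvGoogleL), ("social_media", pvSocialL),
   ("microsoft", pvMicrosoftL), ("email_marketing", pvEmailL), ("analytics", pvAnalyticsL)]

-- _ALL_KNOWN = frozenset(name for _, names in _GROUPS for name in names)
def pvAllKnown : PySem.Set String := PySem.Set.ofList (pvGroups.flatMap (·.2))

-- result is a Python dict written only at fresh distinct keys, i.e. a list of appended pairs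
def get_parameter_categories_alt (parameters : List (String × String)) : List (String × List String) :=
  let result : List (String × List String) :=
    pvGroups.foldl (fun res cg =>
      let matched := parameters.foldl (fun acc kv =>
        if PySem.Set.contains (PySem.Set.ofList cg.2) (PySem.Str.lower kv.1) then acc ++ [kv.1]
        else acc) []
      if matched.isEmpty then res else res ++ [(cg.1, matched)]) []
  let other := parameters.foldl (fun acc kv =>
    if !(PySem.Set.contains pvAllKnown (PySem.Str.lower kv.1)) then acc ++ [kv.1] else acc) []
  if other.isEmpty then result else result ++ [("other", other)]

-- ===== PRECONDITION & SPEC =====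
def Spec_get_parameter_categories (parameters : List (String × String)) (out : List (String × List String)) : Prop := out = get_parameter_categories_alt parameters
instance (parameters : List (String × String)) (out : List (String × List String)) : Decidable (Spec_get_parameter_categories parameters out) := by unfold Spec_get_parameter_categories; infer_instance

-- ===== CLAIM (what is proved, stated in full; the proofs are below) =====
def Claim_equal_get_parameter_categories : Prop := ∀ (parameters : List (String × String)), Dom_get_parameter_categories parameters → Spec_get_parameter_categories parameters (get_parameter_categories parameters)

-- ===== LEMMAS AND PROOFS =====

-- the first-match classifier implicit in A's elif chain
def pvSel (pl : String) : String :=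
  if PySem.Set.contains (PySem.Set.ofList pvUtmL) pl then "utm"
  else if PySem.Set.contains (PySem.Set.ofList pvGoogleL) pl then "google_ads"
  else if PySem.Set.contains (PySem.Set.ofList pvSocialL) pl then "social_media"
  else if PySem.Set.contains (PySem.Set.ofList pvMicrosoftL) pl then "microsoft"
  else if PySem.Set.contains (PySem.Set.ofList pvEmailL) pl then "email_marketing"
  else if PySem.Set.contains (PySem.Set.ofList pvAnalyticsL) pl then "analytics"
  else "other"

-- keys whose lowered name selects category c, in input order
def pvM (parameters : List (String × String)) (c : String) : List String :=
  (parameters.filter (fun kv => pvSel (PySem.Str.lower kv.1) == c)).map (fun kv => kv.1)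

def pvCats : List String :=
  ["utm", "google_ads", "social_media", "microsoft", "email_marketing", "analytics", "other"]

lemma memL {L : List String} {pl : String}
    (h : PySem.Set.contains (PySem.Set.ofList L) pl = true) : pl ∈ L :=
  Iff.mp (PySem.Set.mem_ofList _ _) ((PySem.Set.contains_iff _ _).mp h)

-- A's runtime-lowered sets are B's pre-lowered literal sets
lemma setA_utm : PySem.Set.ofList (UTM_PARAMETERS.map PySem.Str.lower) = PySem.Set.ofList pvUtmL := by decide
lemma setA_google : PySem.Set.ofList (GOOGLE_ADS_PARAMETERS.map PySem.Str.lower) = PySem.Set.ofList pvGoogleL := by decide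
lemma setA_social : PySem.Set.ofList (SOCIAL_MEDIA_PARAMETERS.map PySem.Str.lower) = PySem.Set.ofList pvSocialL := by decide
lemma setA_microsoft : PySem.Set.ofList (MICROSOFT_PARAMETERS.map PySem.Str.lower) = PySem.Set.ofList pvMicrosoftL := by decide
lemma setA_email : PySem.Set.ofList (EMAIL_MARKETING_PARAMETERS.map PySem.Str.lower) = PySem.Set.ofList pvEmailL := by decide
lemma setA_analytics : PySem.Set.ofList (ANALYTICS_PARAMETERS.map PySem.Str.lower) = PySem.Set.ofList pvAnalyticsL := by decide

-- A's loop body is "modify at the selected category"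
lemma stepA_eq :
    (fun (cats : PySem.Dict String (List String)) (kv : String × String) =>
      let param := kv.1
      let param_lower := PySem.Str.lower param
      if PySem.Set.contains (PySem.Set.ofList (UTM_PARAMETERS.map PySem.Str.lower)) param_lower then
        cats.modify "utm" [] (· ++ [param])
      else if PySem.Set.contains (PySem.Set.ofList (GOOGLE_ADS_PARAMETERS.map PySem.Str.lower)) param_lower then
        cats.modify "google_ads" [] (· ++ [param])
      else if PySem.Set.contains (PySem.Set.ofList (SOCIAL_MEDIA_PARAMETERS.map PySem.Str.lower)) param_lower then
        cats.modify "social_media" [] (· ++ [param])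
      else if PySem.Set.contains (PySem.Set.ofList (MICROSOFT_PARAMETERS.map PySem.Str.lower)) param_lower then
        cats.modify "microsoft" [] (· ++ [param])
      else if PySem.Set.contains (PySem.Set.ofList (EMAIL_MARKETING_PARAMETERS.map PySem.Str.lower)) param_lower then
        cats.modify "email_marketing" [] (· ++ [param])
      else if PySem.Set.contains (PySem.Set.ofList (ANALYTICS_PARAMETERS.map PySem.Str.lower)) param_lower then
        cats.modify "analytics" [] (· ++ [param])
      else
        cats.modify "other" [] (· ++ [param]))
    = (fun cats kv => cats.modify (pvSel (PySem.Str.lower kv.1)) [] (· ++ [kv.1])) := by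
  funext cats kv
  simp only [setA_utm, setA_google, setA_social, setA_microsoft, setA_email, setA_analytics, pvSel]
  split_ifs <;> rfl

lemma pvSel_mem (pl : String) : pvSel pl ∈ pvCats := by
  unfold pvSel pvCats
  split_ifs <;> decide

-- the six groups are pairwise disjoint, so per-category membership equals first-match selection
lemma sel_eq_utm (pl : String) :
    PySem.Set.contains (PySem.Set.ofList pvUtmL) pl = (pvSel pl == "utm") := by
  unfold pvSel
  split_ifs with h1 h2 h3 h4 h5 h6
  · rw [h1]; decide
  · have hm := memL h2; fin_cases hm <;> decide
  · have hm := memL h3; fin_cases hm <;> decide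
  · have hm := memL h4; fin_cases hm <;> decide
  · have hm := memL h5; fin_cases hm <;> decide
  · have hm := memL h6; fin_cases hm <;> decide
  · rw [Bool.not_eq_true] at h1; rw [h1]; decide

lemma sel_eq_google (pl : String) :
    PySem.Set.contains (PySem.Set.ofList pvGoogleL) pl = (pvSel pl == "google_ads") := by
  unfold pvSel
  split_ifs with h1 h2 h3 h4 h5 h6
  · have hm := memL h1; fin_cases hm <;> decide
  · rw [h2]; decide
  · have hm := memL h3; fin_cases hm <;> decide
  · have hm := memL h4; fin_cases hm <;> decide
  · have hm := memL h5; fin_cases hm <;> decide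
  · have hm := memL h6; fin_cases hm <;> decide
  · rw [Bool.not_eq_true] at h2; rw [h2]; decide

lemma sel_eq_social (pl : String) :
    PySem.Set.contains (PySem.Set.ofList pvSocialL) pl = (pvSel pl == "social_media") := by
  unfold pvSel
  split_ifs with h1 h2 h3 h4 h5 h6
  · have hm := memL h1; fin_cases hm <;> decide
  · have hm := memL h2; fin_cases hm <;> decide
  · rw [h3]; decide
  · have hm := memL h4; fin_cases hm <;> decide
  · have hm := memL h5; fin_cases hm <;> decide
  · have hm := memL h6; fin_cases hm <;> decide
  · rw [Bool.not_eq_true] at h3; rw [h3]; decide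

lemma sel_eq_microsoft (pl : String) :
    PySem.Set.contains (PySem.Set.ofList pvMicrosoftL) pl = (pvSel pl == "microsoft") := by
  unfold pvSel
  split_ifs with h1 h2 h3 h4 h5 h6
  · have hm := memL h1; fin_cases hm <;> decide
  · have hm := memL h2; fin_cases hm <;> decide
  · have hm := memL h3; fin_cases hm <;> decide
  · rw [h4]; decide
  · have hm := memL h5; fin_cases hm <;> decide
  · have hm := memL h6; fin_cases hm <;> decide
  · rw [Bool.not_eq_true] at h4; rw [h4]; decide

lemma sel_eq_email (pl : String) :
    PySem.Set.contains (PySem.Set.ofList pvEmailL) pl = (pvSel pl == "email_marketing") := by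
  unfold pvSel
  split_ifs with h1 h2 h3 h4 h5 h6
  · have hm := memL h1; fin_cases hm <;> decide
  · have hm := memL h2; fin_cases hm <;> decide
  · have hm := memL h3; fin_cases hm <;> decide
  · have hm := memL h4; fin_cases hm <;> decide
  · rw [h5]; decide
  · have hm := memL h6; fin_cases hm <;> decide
  · rw [Bool.not_eq_true] at h5; rw [h5]; decide

lemma sel_eq_analytics (pl : String) :
    PySem.Set.contains (PySem.Set.ofList pvAnalyticsL) pl = (pvSel pl == "analytics") := by
  unfold pvSel
  split_ifs with h1 h2 h3 h4 h5 h6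
  · have hm := memL h1; fin_cases hm <;> decide
  · have hm := memL h2; fin_cases hm <;> decide
  · have hm := memL h3; fin_cases hm <;> decide
  · have hm := memL h4; fin_cases hm <;> decide
  · have hm := memL h5; fin_cases hm <;> decide
  · rw [h6]; decide
  · rw [Bool.not_eq_true] at h6; rw [h6]; decide

lemma sel_eq_other (pl : String) :
    (!(PySem.Set.contains pvAllKnown pl)) = (pvSel pl == "other") := by
  unfold pvSel
  split_ifs with h1 h2 h3 h4 h5 h6
  · have hm := memL h1; fin_cases hm <;> decide
  · have hm := memL h2; fin_cases hm <;> decide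
  · have hm := memL h3; fin_cases hm <;> decide
  · have hm := memL h4; fin_cases hm <;> decide
  · have hm := memL h5; fin_cases hm <;> decide
  · have hm := memL h6; fin_cases hm <;> decide
  · have hc : PySem.Set.contains pvAllKnown pl = false := by
      by_cases hc : PySem.Set.contains pvAllKnown pl = true
      · exfalso
        have hm := memL hc
        rw [List.mem_flatMap] at hm
        obtain ⟨g, hg, hmem⟩ := hm
        fin_cases hg
        · exact h1 ((PySem.Set.contains_iff _ _).mpr (Iff.mpr (PySem.Set.mem_ofList _ _) hmem))
        · exact h2 ((PySem.Set.contains_iff _ _).mpr (Iff.mpr (PySem.Set.mem_ofList _ _) hmem))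
        · exact h3 ((PySem.Set.contains_iff _ _).mpr (Iff.mpr (PySem.Set.mem_ofList _ _) hmem))
        · exact h4 ((PySem.Set.contains_iff _ _).mpr (Iff.mpr (PySem.Set.mem_ofList _ _) hmem))
        · exact h5 ((PySem.Set.contains_iff _ _).mpr (Iff.mpr (PySem.Set.mem_ofList _ _) hmem))
        · exact h6 ((PySem.Set.contains_iff _ _).mpr (Iff.mpr (PySem.Set.mem_ofList _ _) hmem))
      · rwa [Bool.not_eq_true] at hc
    rw [hc]; decide

-- characterization of A's loop result
lemma A_keys (parameters : List (String × String)) :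
    (parameters.foldl (fun cats kv => cats.modify (pvSel (PySem.Str.lower kv.1)) [] (· ++ [kv.1]))
      (PySem.Dict.ofList [("utm", []), ("google_ads", []), ("social_media", []), ("microsoft", []),
                          ("email_marketing", []), ("analytics", []), ("other", [])])).keys = pvCats := by
  rw [PySem.Dict.keys_foldl_modify_key]
  rw [PySem.Set.update_eq_append_filter]
  have h : (PySem.Set.ofList (parameters.map fun kv => pvSel (PySem.Str.lower kv.1))).filter
      (fun y => !(PySem.Set.contains
        (PySem.Dict.ofList (κ := String) (ν := List String)
          [("utm", []), ("google_ads", []), ("social_media", []), ("microsoft", []),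
           ("email_marketing", []), ("analytics", []), ("other", [])]).keys y)) = [] := by
    rw [List.filter_eq_nil_iff]
    intro y hy
    have hy' := Iff.mp (PySem.Set.mem_ofList _ _) hy
    obtain ⟨kv, _, rfl⟩ := List.mem_map.mp hy'
    have hmem := pvSel_mem (PySem.Str.lower kv.1)
    have hc : PySem.Set.contains
        (PySem.Dict.ofList (κ := String) (ν := List String)
          [("utm", []), ("google_ads", []), ("social_media", []), ("microsoft", []),
           ("email_marketing", []), ("analytics", []), ("other", [])]).keys
        (pvSel (PySem.Str.lower kv.1)) = true :=
      (PySem.Set.contains_iff _ _).mpr hmem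
    rw [hc]; decide
  rw [h, List.append_nil]
  rfl

lemma A_getD (l : List (String × String)) (d : PySem.Dict String (List String)) (c : String) :
    (l.foldl (fun cats kv => cats.modify (pvSel (PySem.Str.lower kv.1)) [] (· ++ [kv.1])) d).getD c []
      = d.getD c [] ++ (l.filter (fun kv => pvSel (PySem.Str.lower kv.1) == c)).map (fun kv => kv.1) := by
  induction l generalizing d with
  | nil => simp
  | cons kv t ih =>
    simp only [List.foldl_cons, List.filter_cons]
    rw [ih, PySem.Dict.getD_modify]
    by_cases h : c = pvSel (PySem.Str.lower kv.1)
    · have hb : (pvSel (PySem.Str.lower kv.1) == c) = true := by simp [h.symm]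
      simp [h, List.append_assoc]
    · have hb : (pvSel (PySem.Str.lower kv.1) == c) = false := by
        simp only [beq_eq_false_iff_ne, ne_eq]
        exact fun e => h e.symm
      simp [h, hb]

lemma A_char (parameters : List (String × String)) :
    get_parameter_categories parameters
      = (pvCats.map (fun c => (c, pvM parameters c))).filter (fun kv => !kv.2.isEmpty) := by
  unfold get_parameter_categories
  rw [stepA_eq]
  show List.filter (fun kv => !kv.2.isEmpty)
      (List.foldl (fun cats kv => cats.modify (pvSel (PySem.Str.lower kv.1)) [] (· ++ [kv.1]))
        (PySem.Dict.ofList [("utm", []), ("google_ads", []), ("social_media", []), ("microsoft", []),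
                            ("email_marketing", []), ("analytics", []), ("other", [])]) parameters).items
    = List.filter (fun kv => !kv.2.isEmpty) (List.map (fun c => (c, pvM parameters c)) pvCats)
  have hnd : (parameters.foldl (fun cats kv => cats.modify (pvSel (PySem.Str.lower kv.1)) [] (· ++ [kv.1]))
      (PySem.Dict.ofList [("utm", []), ("google_ads", []), ("social_media", []), ("microsoft", []),
                          ("email_marketing", []), ("analytics", []), ("other", [])])).keys.Nodup := by
    rw [A_keys]; decide
  rw [PySem.Dict.items_eq_map_keys _ hnd []]
  rw [A_keys]
  congr 1
  apply List.map_congr_left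
  intro c hc
  rw [A_getD]
  fin_cases hc <;> rfl

-- ===== VERDICT (by name: the statement is the Claim_ definition above) =====
set_option maxHeartbeats 2000000 in
theorem get_parameter_categories_spec : Claim_equal_get_parameter_categories := by
  intro parameters _
  unfold Spec_get_parameter_categories
  rw [A_char]
  unfold get_parameter_categories_alt
  simp only [pvGroups, List.foldl, PySem.List.foldl_append_if, List.nil_append,
             sel_eq_utm, sel_eq_google, sel_eq_social, sel_eq_microsoft, sel_eq_email,
             sel_eq_analytics, sel_eq_other, ← pvM.eq_def, pvCats, List.map]
  cases h1 : (pvM parameters "utm").isEmpty <;>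
  cases h2 : (pvM parameters "google_ads").isEmpty <;>
  cases h3 : (pvM parameters "social_media").isEmpty <;>
  cases h4 : (pvM parameters "microsoft").isEmpty <;>
  cases h5 : (pvM parameters "email_marketing").isEmpty <;>
  cases h6 : (pvM parameters "analytics").isEmpty <;>
  cases h7 : (pvM parameters "other").isEmpty <;>
  simp [List.filter, h1, h2, h3, h4, h5, h6, h7]
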